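-- pv_equiv track=rewrite | github.com/3LENDERMAN/Python_projects | 06/connected.py | all_connected
-- ===== SOURCE A (Python) =====
-- def all_connected(stops: dict[str, list[str]]) -> bool:
--     if len(stops) == 1: return True
--     are_joined: set[str] = set()
--     for stop, dests in stops.items():
--         changed = False
--         for dest in dests:
--             if dest in stops: are_joined.add(dest)
--             changed = True
--         if not changed: return False
--     return len(stops) == len(are_joined)
-- ===== SOURCE B (Python) =====
-- def all_connected(stops: dict[str, list[str]]) -> bool:
--     if len(stops) == 1:
--         return True
--     if any(not dests for dests in stops.values()):
--         return False
--     return all(any(stop in dests for dests in stops.values()) for stop in stops)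
-- ===== Notes on version B (the rewrite author's own statement) =====
-- stated objective: alternative
-- what changed: B maintains no set at all: after the single-stop guard it first checks in one pass that no destination list is empty, then decides per key by a direct nested search (for each stop, is it contained in some destination list), instead of A's single pass that accumulates a filtered set under a 'changed' flag and compares its size with len(stops).
import Mathlib
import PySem

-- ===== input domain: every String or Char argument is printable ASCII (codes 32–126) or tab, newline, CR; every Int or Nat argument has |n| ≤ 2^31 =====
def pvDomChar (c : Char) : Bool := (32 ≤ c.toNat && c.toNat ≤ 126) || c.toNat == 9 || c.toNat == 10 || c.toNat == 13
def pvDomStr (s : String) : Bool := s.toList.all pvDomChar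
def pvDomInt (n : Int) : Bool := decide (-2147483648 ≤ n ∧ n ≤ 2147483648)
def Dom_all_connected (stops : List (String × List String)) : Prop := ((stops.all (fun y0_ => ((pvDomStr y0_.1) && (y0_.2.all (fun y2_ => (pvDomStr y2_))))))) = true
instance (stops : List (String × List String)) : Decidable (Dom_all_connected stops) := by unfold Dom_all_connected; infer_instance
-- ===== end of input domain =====

-- B maintains no set at all: after the single-stop guard it checks emptiness in one staged pass
-- and then decides per key by a direct nested search of the destination lists (alternative decomposition).


-- ===== PORT A =====
-- for each (stop, dests): inner fold is the 'for dest in dests' body (add keys to are_joined, set changed);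
-- 'if not changed: return False' is the 'none' branch
def allConnA_loop (keys : List String) : List (String × List String) → PySem.Set String → Option (PySem.Set String)
  | [], aj => some aj
  | (_, dests) :: rest, aj =>
      let st := dests.foldl
        (fun (st : PySem.Set String × Bool) dest =>
          ((if keys.contains dest then PySem.Set.add st.1 dest else st.1), true))
        (aj, false)
      if st.2 then allConnA_loop keys rest st.1 else none

def all_connected (stops : List (String × List String)) : Bool :=
  if stops.length == 1 then true
  else
    match allConnA_loop (stops.map Prod.fst) stops PySem.Set.empty with
    | none => false
    | some are_joined => stops.length == are_joined.length

-- ===== PORT B =====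
-- 'if any(not dests for dests in stops.values()): return False'
-- 'return all(any(stop in dests for dests in stops.values()) for stop in stops)'
def all_connected_alt (stops : List (String × List String)) : Bool :=
  if stops.length == 1 then true
  else if stops.any (fun p => p.2.isEmpty) then false
  else (stops.map Prod.fst).all (fun stop => stops.any (fun p => p.2.contains stop))

-- ===== PRECONDITION & SPEC =====
-- Pre_ excludes association lists with duplicate keys: they do not represent a Python dict
-- (dict construction collapses duplicates), so A's behaviour on them is not that of any dict input.
def Pre_all_connected (stops : List (String × List String)) : Prop := (stops.map Prod.fst).Nodup
instance (stops : List (String × List String)) : Decidable (Pre_all_connected stops) := by unfold Pre_all_connected; infer_instance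

def pvWitness_all_connected : (List (String × List String)) := [("a", ["b", "a"]), ("b", ["a"])]

def Spec_all_connected (stops : List (String × List String)) (out : Bool) : Prop := out = all_connected_alt stops
instance (stops : List (String × List String)) (out : Bool) : Decidable (Spec_all_connected stops out) := by unfold Spec_all_connected; infer_instance

-- ===== CLAIM (what is proved, stated in full; the proofs are below) =====
def Claim_equal_all_connected : Prop := ∀ (stops : List (String × List String)), Dom_all_connected stops → Pre_all_connected stops → Spec_all_connected stops (all_connected stops)

-- ===== LEMMAS AND PROOFS =====

-- A's inner 'for dest in dests' fold: the flag becomes b || dests nonempty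
theorem allConn_inner_snd (keys dests : List String) (aj : PySem.Set String) (b : Bool) :
    (dests.foldl (fun (st : PySem.Set String × Bool) dest =>
      ((if keys.contains dest then PySem.Set.add st.1 dest else st.1), true)) (aj, b)).2
      = (b || !dests.isEmpty) := by
  induction dests generalizing aj b with
  | nil => simp
  | cons d ds ih =>
      simp only [List.foldl_cons]
      rw [ih]
      simp

-- membership in A's inner fold result
theorem allConn_inner_mem (keys dests : List String) (aj : PySem.Set String) (b : Bool) (x : String) :
    (x ∈ (dests.foldl (fun (st : PySem.Set String × Bool) dest =>
      ((if keys.contains dest then PySem.Set.add st.1 dest else st.1), true)) (aj, b)).1)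
      ↔ (x ∈ aj ∨ (x ∈ keys ∧ x ∈ dests)) := by
  induction dests generalizing aj b with
  | nil => simp
  | cons d ds ih =>
      simp only [List.foldl_cons]
      rw [ih]
      by_cases hk : d ∈ keys
      · simp only [List.contains_eq_mem, hk, decide_true, if_pos, PySem.Set.mem_add,
          List.mem_cons]
        constructor
        · rintro ((h | rfl) | ⟨h1, h2⟩)
          · exact Or.inl h
          · exact Or.inr ⟨hk, Or.inl rfl⟩
          · exact Or.inr ⟨h1, Or.inr h2⟩
        · rintro (h | ⟨h1, rfl | h2⟩)
          · exact Or.inl (Or.inl h)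
          · exact Or.inl (Or.inr rfl)
          · exact Or.inr ⟨h1, h2⟩
      · simp only [List.contains_eq_mem, hk, decide_false, Bool.false_eq_true, reduceIte, List.mem_cons]
        constructor
        · rintro (h | ⟨h1, h2⟩)
          · exact Or.inl h
          · exact Or.inr ⟨h1, Or.inr h2⟩
        · rintro (h | ⟨h1, rfl | h2⟩)
          · exact Or.inl h
          · exact absurd h1 hk
          · exact Or.inr ⟨h1, h2⟩

-- A's inner fold keeps the set duplicate-free
theorem allConn_inner_nodup (keys dests : List String) (aj : PySem.Set String) (b : Bool)
    (h : aj.Nodup) :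
    (dests.foldl (fun (st : PySem.Set String × Bool) dest =>
      ((if keys.contains dest then PySem.Set.add st.1 dest else st.1), true)) (aj, b)).1.Nodup := by
  induction dests generalizing aj b with
  | nil => simpa
  | cons d ds ih =>
      simp only [List.foldl_cons]
      exact ih _ _ (by split; exacts [PySem.Set.nodup_add _ _ h, h])

-- A's loop returns none exactly when some destination list is empty
theorem allConnA_loop_none (keys : List String) :
    ∀ (rest : List (String × List String)) (aj : PySem.Set String),
      (allConnA_loop keys rest aj = none) ↔ (rest.any (fun p => p.2.isEmpty) = true) := by
  intro rest
  induction rest with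
  | nil => intro aj; simp [allConnA_loop]
  | cons p rest ih =>
      intro aj
      obtain ⟨stop, dests⟩ := p
      by_cases hd : dests.isEmpty
      · have hde : dests = [] := List.isEmpty_iff.mp hd
        subst hde
        simp [allConnA_loop]
      · have hd' : dests.isEmpty = false := by simpa using hd
        simp only [allConnA_loop, allConn_inner_snd, hd', Bool.false_or, Bool.not_false,
          reduceIte, List.any_cons, Bool.false_or]
        exact ih _

-- on success, A's loop result is the duplicate-free list of keys appearing in some destination list
theorem allConnA_loop_some (keys : List String) :
    ∀ (rest : List (String × List String)) (aj : PySem.Set String) (a : PySem.Set String),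
      aj.Nodup → allConnA_loop keys rest aj = some a →
      a.Nodup ∧ ∀ x, x ∈ a ↔ x ∈ aj ∨ (x ∈ keys ∧ rest.any (fun p => p.2.contains x) = true) := by
  intro rest
  induction rest with
  | nil =>
      intro aj a hnd ha
      simp only [allConnA_loop, Option.some.injEq] at ha
      subst ha
      refine ⟨hnd, fun x => by simp⟩
  | cons p rest ih =>
      intro aj a hnd ha
      obtain ⟨stop, dests⟩ := p
      by_cases hd : dests.isEmpty
      · have hde : dests = [] := List.isEmpty_iff.mp hd
        subst hde
        simp [allConnA_loop] at ha
      · have hd' : dests.isEmpty = false := by simpa using hd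
        simp only [allConnA_loop, allConn_inner_snd, hd', Bool.false_or, Bool.not_false,
          reduceIte] at ha
        obtain ⟨hand, hmem⟩ := ih _ a (allConn_inner_nodup keys dests aj false hnd) ha
        refine ⟨hand, fun x => ?_⟩
        rw [hmem x, allConn_inner_mem]
        simp only [List.any_cons, Bool.or_eq_true, List.contains_eq_mem, decide_eq_true_eq]
        tauto
-- length-equality on the filtered set = 'every key satisfies q', under Nodup keys
theorem allConn_final (keys a : List String) (q : String → Bool) (hk : keys.Nodup) (ha : a.Nodup)
    (hmem : ∀ x, x ∈ a ↔ x ∈ keys ∧ q x = true) :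
    (keys.length == a.length) = keys.all q := by
  have hsub : a ⊆ keys := fun x hx => ((hmem x).mp hx).1
  by_cases h : ∀ x ∈ keys, q x = true
  · have hba : keys ⊆ a := fun x hx => (hmem x).mpr ⟨hx, h x hx⟩
    have hperm : a.Perm keys := (List.perm_ext_iff_of_nodup ha hk).mpr
      (fun x => ⟨fun hx => hsub hx, fun hx => hba hx⟩)
    have hlen : keys.length = a.length := (hperm.length_eq).symm
    have hall : keys.all q = true := by
      rw [List.all_eq_true]; exact h
    simp [hlen, hall]
  · have hall : keys.all q = false := by
      rw [Bool.eq_false_iff]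
      intro hc
      rw [List.all_eq_true] at hc
      exact h hc
    rw [hall]
    have hlt : a.length < keys.length := by
      simp only [not_forall] at h
      obtain ⟨x, hxk, hxq⟩ := h
      have hxa : x ∉ a := fun hx => hxq ((hmem x).mp hx).2
      have hsp : List.Subperm a keys := ha.subperm hsub
      rcases lt_or_eq_of_le hsp.length_le with h' | h'
      · exact h'
      · exfalso
        exact hxa ((hsp.perm_of_length_le (le_of_eq h'.symm)).mem_iff.mpr hxk)
    simp [Nat.ne_of_gt hlt]

-- ===== VERDICT (by name: the statement is the Claim_ definition above) =====
theorem all_connected_spec : Claim_equal_all_connected := by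
  intro stops _ hpre
  unfold Spec_all_connected all_connected all_connected_alt
  by_cases h1 : stops.length == 1
  · simp [h1]
  · simp only [h1, Bool.false_eq_true, reduceIte]
    cases hA : allConnA_loop (stops.map Prod.fst) stops PySem.Set.empty with
    | none =>
        have hE : stops.any (fun p => p.2.isEmpty) = true :=
          (allConnA_loop_none (stops.map Prod.fst) stops PySem.Set.empty).mp hA
        simp [hE]
    | some a =>
        have hE : stops.any (fun p => p.2.isEmpty) = false := by
          rw [Bool.eq_false_iff]
          intro hc
          have h2 := (allConnA_loop_none (stops.map Prod.fst) stops PySem.Set.empty).mpr hc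
          rw [hA] at h2
          simp at h2
        rw [hE]
        obtain ⟨hand, hmem⟩ := allConnA_loop_some (stops.map Prod.fst) stops PySem.Set.empty a
          (by simp [PySem.Set.empty]) hA
        have := allConn_final (stops.map Prod.fst) a
          (fun x => stops.any (fun p => p.2.contains x)) hpre hand
          (fun x => by rw [hmem x]; simp [PySem.Set.empty])
        simpa using this
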